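-- pv_equiv track=rewrite | github.com/nsilz44/blockchainCWK | block.py | littleEndian
-- ===== SOURCE A (Python) =====
-- def littleEndian(hex):
--     a = hex[-2::-2]
--     b = hex[::-2]
--     new_hex = ''
--     for i in range(0,len(hex)//2):
--         new_hex= new_hex + a[i]
--         new_hex= new_hex + b[i]
--     if new_hex[-1] == 'x':
--         new_hex = new_hex[:-2]
--     return new_hex
-- ===== SOURCE B (Python) =====
-- def littleEndian(hex):
--     s = hex[len(hex) % 2:]
--     out = ''
--     for i in range(0, len(s), 2):
--         out = s[i:i+2] + out
--     if out[-1] == 'x':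
--         out = out[:-2]
--     return out
-- ===== Notes on version B (the rewrite author's own statement) =====
-- stated objective: simpler
-- what changed: B drops the leading char on odd length and builds the byte-reversed string by prepending each 2-char chunk in one forward pass, instead of A's interleaving of two stride(-2)-reversed slices indexed in a counting loop; the final trailing-'x' trim is kept.
-- outside the precondition, e.g. on littleEndian('a'): A raises IndexError, B raises IndexError
import Mathlib
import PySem

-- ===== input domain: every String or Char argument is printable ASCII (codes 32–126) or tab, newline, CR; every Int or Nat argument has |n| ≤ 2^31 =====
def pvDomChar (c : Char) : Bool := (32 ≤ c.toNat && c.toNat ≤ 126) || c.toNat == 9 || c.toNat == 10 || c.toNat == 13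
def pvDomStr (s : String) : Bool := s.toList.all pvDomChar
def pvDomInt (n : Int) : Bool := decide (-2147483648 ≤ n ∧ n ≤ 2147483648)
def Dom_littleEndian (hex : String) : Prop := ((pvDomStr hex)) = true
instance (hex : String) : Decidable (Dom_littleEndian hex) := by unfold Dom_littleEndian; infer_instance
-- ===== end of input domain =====

-- B reverses the byte order by one forward pass that prepends each 2-char chunk, instead of
-- A's interleaving of two stride(-2)-reversed strings; objective: simpler (same cost).

-- ===== PORT A =====
-- a = hex[-2::-2]; b = hex[::-2]; new_hex built by the loop; trailing-'x' trim kept verbatim.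
def littleEndian (hex : String) : String :=
  let h := hex.toList
  let a := (PySem.List.slice? h (some (-2)) none (-2)).getD []
  let b := (PySem.List.slice? h none none (-2)).getD []
  let newHex := (PySem.List.pyRange 0 (PySem.Int.floordiv (h.length : Int) 2) 1).foldl
    (fun acc i => (acc ++ [(PySem.List.pyGet? a i).getD ' ']) ++ [(PySem.List.pyGet? b i).getD ' ']) []
  let newHex := if PySem.List.pyGet? newHex (-1) = some 'x'
                then PySem.List.slice newHex none (some (-2)) else newHex
  String.ofList newHex

-- ===== PORT B =====
-- s = hex[len(hex)%2:]; out = ''; for i in range(0, len(s), 2): out = s[i:i+2] + out; same final trim.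
def littleEndian_alt (hex : String) : String :=
  let h := hex.toList
  let s := PySem.List.slice h (some (PySem.Int.mod (h.length : Int) 2)) none
  let out := (PySem.List.pyRange 0 (s.length : Int) 2).foldl
    (fun acc i => PySem.List.slice s (some i) (some (i + 2)) ++ acc) []
  let out := if PySem.List.pyGet? out (-1) = some 'x'
             then PySem.List.slice out none (some (-2)) else out
  String.ofList out

-- ===== PRECONDITION & SPEC =====
-- Pre_ excludes strings of length < 2: there the Python A's new_hex is empty and new_hex[-1] raises IndexError.
def Pre_littleEndian (hex : String) : Prop := 2 ≤ hex.toList.length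
instance (hex : String) : Decidable (Pre_littleEndian hex) := by unfold Pre_littleEndian; infer_instance
def pvWitness_littleEndian : String := "0a1b"
def Spec_littleEndian (hex : String) (out : String) : Prop := out = littleEndian_alt hex
instance (hex : String) (out : String) : Decidable (Spec_littleEndian hex out) := by unfold Spec_littleEndian; infer_instance

-- ===== CLAIM (what is proved, stated in full; the proofs are below) =====
def Claim_equal_littleEndian : Prop := ∀ (hex : String), Dom_littleEndian hex → Pre_littleEndian hex → Spec_littleEndian hex (littleEndian hex)

-- ===== LEMMAS AND PROOFS =====

-- hex[::-2] picks the chars at indices n-1, n-3, … (closed form of the step -2 slice).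
lemma pv_slice_b (h : List Char) :
    (PySem.List.slice? h none none (-2)).getD [] =
      (List.range ((h.length+1)/2)).map (fun k => h.getD (h.length-1-2*k) ' ') := by
  simp only [PySem.List.slice?, PySem.List.sliceIndices]
  simp only [show ¬((-2:Int) = 0) by decide, show ((-2:Int) < 0) = True by simp,
    show ¬((0:Int) < -2) by decide, if_true, if_false, neg_neg]
  rw [show (if (-1:Int) < ↑h.length - 1 then (((h.length:Int) - 1 - -1 + 2 - 1) / 2).toNat else 0)
        = (h.length+1)/2 by split_ifs with hh <;> omega]
  rw [Option.getD_some]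
  rw [List.filterMap_congr (g := fun x => some (h.getD (h.length-1-2*x) ' ')) ?_]
  · exact congrFun List.filterMap_eq_map _
  · intro x hx
    simp only [List.mem_range] at hx
    rw [show ((h.length:Int) - 1 + -2 * ↑x).toNat = h.length - 1 - 2*x by omega]
    have hb : h.length - 1 - 2*x < h.length := by omega
    simp [List.getElem?_eq_getElem hb]

-- hex[-2::-2] picks the chars at indices n-2, n-4, … (closed form of the step -2 slice).
lemma pv_slice_a (h : List Char) :
    (PySem.List.slice? h (some (-2)) none (-2)).getD [] =
      (List.range (h.length/2)).map (fun k => h.getD (h.length-2-2*k) ' ') := by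
  simp only [PySem.List.slice?, PySem.List.sliceIndices]
  simp only [show ¬((-2:Int) = 0) by decide, show ((-2:Int) < 0) = True by simp,
    show ¬((0:Int) < -2) by decide, if_true, if_false, neg_neg]
  rw [show (if (-1:Int) < max (-2 + (h.length:Int)) (-1)
              then ((max (-2 + (h.length:Int)) (-1) - -1 + 2 - 1) / 2).toNat else 0)
        = h.length/2 by split_ifs with hh <;> omega]
  rw [Option.getD_some]
  rw [List.filterMap_congr (g := fun x => some (h.getD (h.length-2-2*x) ' ')) ?_]
  · exact congrFun List.filterMap_eq_map _
  · intro x hx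
    simp only [List.mem_range] at hx
    rw [show (max (-2 + (h.length:Int)) (-1) + -2 * ↑x).toNat = h.length - 2 - 2*x by omega]
    have hb : h.length - 2 - 2*x < h.length := by omega
    simp [List.getElem?_eq_getElem hb]

-- A's loop equals a flatMap of the byte pairs, counted from the end.
lemma pv_coreA (h : List Char) :
    (PySem.List.pyRange 0 (PySem.Int.floordiv (h.length : Int) 2) 1).foldl
      (fun acc i => (acc ++ [(PySem.List.pyGet? ((PySem.List.slice? h (some (-2)) none (-2)).getD []) i).getD ' ']) ++
                    [(PySem.List.pyGet? ((PySem.List.slice? h none none (-2)).getD []) i).getD ' ']) [] =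
    (List.range (h.length/2)).flatMap
      (fun k => [h.getD (h.length-2-2*k) ' ', h.getD (h.length-1-2*k) ' ']) := by
  rw [pv_slice_a, pv_slice_b,
    show PySem.Int.floordiv ((h.length:Int)) 2 = ((h.length/2 : Nat) : Int) from
      (by exact_mod_cast PySem.Int.floordiv_natCast h.length 2),
    PySem.List.pyRange_one]
  simp only [sub_zero, Int.toNat_natCast, zero_add, List.foldl_map]
  rw [PySem.List.foldl_congr_mem _ _ (fun acc k =>
        acc ++ [h.getD (h.length-2-2*k) ' ', h.getD (h.length-1-2*k) ' ']) _ ?_]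
  · simpa using PySem.List.foldl_append_eq_flatMap
      (fun k => [h.getD (h.length-2-2*k) ' ', h.getD (h.length-1-2*k) ' ']) (List.range (h.length/2)) []
  · intro acc k hk
    simp only [List.mem_range] at hk
    have hk2 : k < (h.length+1)/2 := by omega
    simp [PySem.List.pyGet?_natCast, hk, hk2,
      List.append_assoc]

-- a fold that prepends p k over range M is the flatMap of p read back-to-front
lemma pv_foldl_prepend {α : Type} (p : Nat → List α) (M : Nat) (acc : List α) :
    (List.range M).foldl (fun acc k => p k ++ acc) acc =
      (List.range M).flatMap (fun k => p (M-1-k)) ++ acc := by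
  induction M generalizing acc with
  | zero => simp
  | succ M ih =>
    conv_lhs => rw [List.range_succ]
    rw [List.foldl_append, ih]
    simp only [List.foldl_cons, List.foldl_nil]
    conv_rhs => rw [List.range_succ_eq_map]
    simp only [List.flatMap_cons, List.flatMap_map]
    rw [show (fun k => p (M + 1 - 1 - (k+1))) = (fun k => p (M-1-k)) from
          funext fun k => by congr 1; omega]
    simp [List.append_assoc]

-- two chars out of a drop/take window
lemma pv_take_two (h : List Char) (i : Nat) (hi : i + 1 < h.length) :
    (h.drop i).take 2 = [h.getD i ' ', h.getD (i+1) ' '] := by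
  rw [List.drop_eq_getElem_cons (by omega : i < h.length),
      List.drop_eq_getElem_cons (by omega : i + 1 < h.length)]
  simp only [List.take_succ_cons, List.take_zero]
  rw [List.getD_eq_getElem _ _ (by omega : i < h.length),
      List.getD_eq_getElem _ _ (by omega : i + 1 < h.length)]

-- B's loop equals the same flatMap.
lemma pv_coreB (h : List Char) :
    (PySem.List.pyRange 0
        (((PySem.List.slice h (some (PySem.Int.mod (h.length : Int) 2)) none).length : Int)) 2).foldl
      (fun acc i => PySem.List.slice (PySem.List.slice h (some (PySem.Int.mod (h.length : Int) 2)) none)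
                      (some i) (some (i + 2)) ++ acc) [] =
    (List.range (h.length/2)).flatMap
      (fun k => [h.getD (h.length-2-2*k) ' ', h.getD (h.length-1-2*k) ' ']) := by
  rw [show PySem.Int.mod ((h.length:Int)) 2 = ((h.length % 2 : Nat) : Int) from
        (by exact_mod_cast PySem.Int.mod_natCast h.length 2),
      PySem.List.slice_from_natCast]
  rw [PySem.List.pyRange_of_pos _ _ (by decide : (0:Int) < 2)]
  rw [show (if (0:Int) < ((h.drop (h.length % 2)).length : Int)
              then ((((h.drop (h.length % 2)).length : Int) - 0 + 2 - 1) / 2).toNat else 0)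
        = h.length/2 by simp only [List.length_drop]; split_ifs with hh <;> omega]
  rw [List.foldl_map]
  rw [PySem.List.foldl_congr_mem _ _ (fun acc (k : Nat) =>
        [h.getD (h.length % 2 + 2*k) ' ', h.getD (h.length % 2 + 2*k + 1) ' '] ++ acc) _ ?_]
  · rw [pv_foldl_prepend, List.append_nil]
    apply List.flatMap_congr
    intro k hk
    simp only [List.mem_range] at hk
    rw [show h.length % 2 + 2*(h.length/2 - 1 - k) = h.length - 2 - 2*k by omega]
    rw [show h.length - 2 - 2*k + 1 = h.length - 1 - 2*k by omega]
  · intro acc k hk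
    simp only [List.mem_range] at hk
    rw [show (0:Int) + 2 * (k:Int) = ((2*k : Nat) : Int) by push_cast; ring]
    rw [show ((2*k : Nat) : Int) + 2 = ((2*k : Nat) : Int) + ((2:Nat) : Int) by norm_num]
    rw [PySem.List.slice_natCast_add, List.drop_drop]
    rw [pv_take_two h (h.length % 2 + 2*k) (by omega)]

-- ===== VERDICT (by name: the statement is the Claim_ definition above) =====
theorem littleEndian_spec : Claim_equal_littleEndian := by
  intro hex _ _
  unfold Spec_littleEndian
  dsimp only [littleEndian, littleEndian_alt]
  rw [pv_coreA hex.toList, pv_coreB hex.toList]
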